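-- pv_equiv track=rewrite | github.com/l2yujw/CodingTest | 프로그래머스/3/12938. 최고의 집합/최고의 집합.py | solution
-- ===== SOURCE A (Python) =====
-- def solution(n, s):
--     if s < n:
--         return [-1]
--
--     base = s // n
--     answer = list(base for _ in range(n))
--
--     rest = s % n
--     for i in range(0, rest):
--         answer[i] += 1
--
--     return sorted(answer)
-- ===== SOURCE B (Python) =====
-- def solution(n, s):
--     if s < n:
--         return [-1]
--     out = []
--     while n > 0:
--         q = -((-s) // n)  # ceil(s/n): greedily take the largest (last) element
--         out.append(q)
--         s -= q
--         n -= 1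
--     out.reverse()
--     return out
-- ===== Notes on version B (the rewrite author's own statement) =====
-- stated objective: alternative
-- what changed: B replaces A's build-all/increment-prefix/sort approach with a greedy loop: it repeatedly takes ceil(s/n) as the current largest element, subtracts it from s, decrements n, and reverses the collected values into ascending order; no division base/rest split and no sort.
import Mathlib
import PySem

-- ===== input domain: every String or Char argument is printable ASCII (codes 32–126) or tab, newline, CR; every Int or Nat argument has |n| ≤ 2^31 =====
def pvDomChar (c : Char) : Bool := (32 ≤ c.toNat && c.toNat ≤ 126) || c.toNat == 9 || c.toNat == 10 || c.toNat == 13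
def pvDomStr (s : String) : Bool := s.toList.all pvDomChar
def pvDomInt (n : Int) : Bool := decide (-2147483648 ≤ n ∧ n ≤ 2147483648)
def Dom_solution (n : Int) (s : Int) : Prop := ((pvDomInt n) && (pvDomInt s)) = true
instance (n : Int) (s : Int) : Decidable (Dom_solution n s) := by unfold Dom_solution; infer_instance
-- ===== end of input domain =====

-- B replaces A's build/increment/sort with a greedy loop that repeatedly takes ceil(s/n) as the
-- current largest element and reverses the collected values; objective: alternative (no sort, no base/rest split).

-- ===== PORT A =====
def solution (n : Int) (s : Int) : List Int :=
  if s < n then [-1]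
  else
    let base := PySem.Int.floordiv s n
    let answer := (PySem.List.pyRange 0 n 1).map (fun _ => base)
    let rest := PySem.Int.mod s n
    let answer := (PySem.List.pyRange 0 rest 1).foldl
      (fun acc i => PySem.List.pySetD acc i (PySem.List.pyGetD acc i 0 + 1)) answer
    PySem.List.sorted answer (fun x => x) false

-- ===== PORT B =====
-- the while-loop of Source B: repeatedly append q = ceil(s/n) (= -((-s)//n)), subtract, decrement n
def solAltLoop (n : Int) (s : Int) (out : List Int) : List Int :=
  if 0 < n then
    solAltLoop (n - 1) (s - -(PySem.Int.floordiv (-s) n))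
      (out ++ [-(PySem.Int.floordiv (-s) n)])
  else out
termination_by n.toNat
decreasing_by omega

def solution_alt (n : Int) (s : Int) : List Int :=
  if s < n then [-1]
  else (solAltLoop n s []).reverse

-- ===== PRECONDITION & SPEC =====
-- Pre_ excludes exactly the inputs where A raises ZeroDivisionError: n = 0 with 0 ≤ s.
def Pre_solution (n : Int) (s : Int) : Prop := ¬ (n = 0 ∧ 0 ≤ s)
instance (n : Int) (s : Int) : Decidable (Pre_solution n s) := by unfold Pre_solution; infer_instance
def pvWitness_solution : Int × Int := (3, 11)

def Spec_solution (n : Int) (s : Int) (out : List Int) : Prop := out = solution_alt n s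
instance (n : Int) (s : Int) (out : List Int) : Decidable (Spec_solution n s out) := by unfold Spec_solution; infer_instance

-- ===== CLAIM (what is proved, stated in full; the proofs are below) =====
def Claim_equal_solution : Prop := ∀ (n : Int) (s : Int), Dom_solution n s → Pre_solution n s → Spec_solution n s (solution n s)

-- ===== LEMMAS AND PROOFS =====

-- A's increment loop turns replicate m b into r copies of (b+1) followed by (m-r) copies of b.
theorem pv_loop (b : Int) (m r : Nat) (hr : r ≤ m) :
    (PySem.List.pyRange 0 (r : Int) 1).foldl
      (fun acc i => PySem.List.pySetD acc i (PySem.List.pyGetD acc i 0 + 1))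
      (List.replicate m b)
    = List.replicate r (b + 1) ++ List.replicate (m - r) b := by
  induction r with
  | zero => simp [PySem.List.pyRange_one_eq_nil]
  | succ k ih =>
    have hsplit : PySem.List.pyRange 0 ((k : Int) + 1) 1
        = PySem.List.pyRange 0 (k : Int) 1 ++ [(k : Int)] :=
      PySem.List.pyRange_one_succ_right (by omega)
    have hcast : ((k + 1 : Nat) : Int) = (k : Int) + 1 := by push_cast; ring
    rw [hcast, hsplit, List.foldl_append, ih (by omega)]
    simp only [List.foldl_cons, List.foldl_nil]
    have hget : PySem.List.pyGetD (List.replicate k (b + 1) ++ List.replicate (m - k) b) (k : Int) 0 = b := by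
      have hlen : k < (List.replicate k (b + 1) ++ List.replicate (m - k) b).length := by
        simp; omega
      rw [PySem.List.pyGetD_natCast, List.getD_eq_getElem _ _ hlen,
        List.getElem_append_right (by simp)]
      simp
    rw [hget, PySem.List.pySetD_natCast]
    have hset : (List.replicate k (b + 1) ++ List.replicate (m - k) b).set k (b + 1)
        = List.replicate (k + 1) (b + 1) ++ List.replicate (m - (k + 1)) b := by
      rw [List.set_append_right _ _ (by simp)]
      have hmk : m - k = (m - (k + 1)) + 1 := by omega
      simp only [List.length_replicate, Nat.sub_self, hmk,
        List.replicate_succ, List.set_cons_zero]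
      rw [List.append_cons, ← List.replicate_succ']
      simp [List.replicate_succ]
    rw [hset]

-- A equals the canonical ascending replicate form (positive n, no early return).
theorem solution_eq_canon (n s : Int) (hpos : 0 < n) (hge : ¬ s < n) :
    solution n s
      = List.replicate (n - PySem.Int.mod s n).toNat (PySem.Int.floordiv s n)
          ++ List.replicate (PySem.Int.mod s n).toNat (PySem.Int.floordiv s n + 1) := by
  unfold solution
  simp only [if_neg hge]
  set base := PySem.Int.floordiv s n with hbase
  set rest := PySem.Int.mod s n with hrest
  have hnonneg := PySem.Int.mod_nonneg (a := s) (b := n) hpos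
  have hltn := PySem.Int.mod_lt (a := s) (b := n) hpos
  have hmap : (PySem.List.pyRange 0 n 1).map (fun _ => base) = List.replicate n.toNat base := by
    rw [List.map_const']
    simp [PySem.List.length_pyRange_one]
  have hcast : rest = ((rest.toNat : Nat) : Int) := by omega
  have hloop := pv_loop base n.toNat rest.toNat (by omega)
  rw [hmap, hcast, hloop]
  have hsorted : PySem.List.sorted
      (List.replicate rest.toNat (base + 1) ++ List.replicate (n.toNat - rest.toNat) base)
      (fun x => x) false
      = List.replicate (n.toNat - rest.toNat) base ++ List.replicate rest.toNat (base + 1) := by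
    apply PySem.List.sorted_id_eq_of_perm_of_pairwise
    · exact List.perm_append_comm
    · apply List.pairwise_append.mpr
      refine ⟨List.pairwise_replicate.mpr (Or.inr (le_refl _)),
        List.pairwise_replicate.mpr (Or.inr (le_refl _)), ?_⟩
      intro a ha c hc
      rw [List.eq_of_mem_replicate ha, List.eq_of_mem_replicate hc]
      omega
  rw [hsorted]
  have h3 : (n - rest).toNat = n.toNat - rest.toNat := by omega
  rw [← hcast, h3]

-- The accumulator of B's loop is only ever appended to.
theorem solAltLoop_acc (m : Nat) (n s : Int) (hm : n.toNat = m) (out : List Int) :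
    solAltLoop n s out = out ++ solAltLoop n s [] := by
  induction m generalizing n s out with
  | zero =>
    unfold solAltLoop
    have : ¬ 0 < n := by omega
    simp [this]
  | succ k ih =>
    by_cases hpos : 0 < n
    · have h1 := ih (n - 1) (s - -(PySem.Int.floordiv (-s) n)) (by omega)
      conv_lhs => rw [solAltLoop]
      conv_rhs => rw [solAltLoop]
      simp only [if_pos hpos]
      rw [h1 (out ++ [-(PySem.Int.floordiv (-s) n)]), h1 ([] ++ [-(PySem.Int.floordiv (-s) n)])]
      simp
    · unfold solAltLoop; simp [hpos]

-- B's greedy ceiling loop produces exactly the descending replicate list.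
theorem solAltLoop_canon (m : Nat) (n s : Int) (hpos : 0 < n) (hm : n.toNat = m) :
    (solAltLoop n s []).reverse
      = List.replicate (n - PySem.Int.mod s n).toNat (PySem.Int.floordiv s n)
          ++ List.replicate (PySem.Int.mod s n).toNat (PySem.Int.floordiv s n + 1) := by
  induction m generalizing n s with
  | zero => omega
  | succ k ih =>
    have hsum := PySem.Int.floordiv_mul_add_mod s n
    have hnonneg := PySem.Int.mod_nonneg (a := s) (b := n) hpos
    have hltn := PySem.Int.mod_lt (a := s) (b := n) hpos
    set base := PySem.Int.floordiv s n with hbase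
    set rest := PySem.Int.mod s n with hrest
    -- the greedy pick q = ceil(s/n)
    have hq : -(PySem.Int.floordiv (-s) n) = base + (if rest = 0 then 0 else 1) := by
      rw [PySem.Int.neg_floordiv_neg_eq_iff_of_pos (hb := hpos)]
      by_cases h0 : rest = 0
      · simp [h0]; constructor <;> nlinarith
      · have hr1 : 0 < rest := lt_of_le_of_ne hnonneg (Ne.symm h0)
        simp [h0]; constructor <;> nlinarith
    rw [solAltLoop, if_pos hpos,
      solAltLoop_acc ((n - 1).toNat) (n - 1) _ rfl, List.nil_append, List.reverse_append]
    by_cases hn1 : n = 1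
    · -- last step: rest = 0, the loop stops
      have h0 : rest = 0 := by omega
      have hstop : solAltLoop (n - 1) (s - -(PySem.Int.floordiv (-s) n)) [] = [] := by
        unfold solAltLoop; simp [hn1]
      rw [hstop, hq]
      simp [hn1, h0]
    · -- n >= 2: the remaining sum keeps the same base, rest shrinks by the pick
      have hn2 : 0 < n - 1 := by omega
      have hsum' := PySem.Int.floordiv_mul_add_mod (s - -(PySem.Int.floordiv (-s) n)) (n - 1)
      have hnonneg' := PySem.Int.mod_nonneg (a := s - -(PySem.Int.floordiv (-s) n)) (b := n - 1) hn2
      have hltn' := PySem.Int.mod_lt (a := s - -(PySem.Int.floordiv (-s) n)) (b := n - 1) hn2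
      have hbase' : PySem.Int.floordiv (s - -(PySem.Int.floordiv (-s) n)) (n - 1) = base := by
        rw [PySem.Int.floordiv_eq_iff_of_pos (hb := hn2), hq]
        by_cases h0 : rest = 0
        · simp [h0]; constructor <;> nlinarith
        · have hr1 : 0 < rest := lt_of_le_of_ne hnonneg (Ne.symm h0)
          simp [h0]; constructor <;> nlinarith
      have hrest' : PySem.Int.mod (s - -(PySem.Int.floordiv (-s) n)) (n - 1)
          = rest - (if rest = 0 then 0 else 1) := by
        rw [hbase'] at hsum'
        rw [hq] at hsum' ⊢
        by_cases h0 : rest = 0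
        · simp [h0] at hsum' ⊢; nlinarith
        · have hr1 : 0 < rest := lt_of_le_of_ne hnonneg (Ne.symm h0)
          simp [h0] at hsum' ⊢; nlinarith
      rw [ih (n - 1) _ hn2 (by omega), hbase', hrest', hq]
      by_cases h0 : rest = 0
      · simp only [if_pos h0]
        have e1 : (n - 1 - (rest - 0)).toNat = n.toNat - 1 := by omega
        have e3 : (n - rest).toNat = n.toNat := by omega
        have e4 : (rest - 0).toNat = 0 := by omega
        have e5 : rest.toNat = 0 := by omega
        have e2 : n.toNat = (n.toNat - 1) + 1 := by omega
        rw [e1, e3, e4, e5, e2, List.replicate_succ']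
        simp
      · simp only [if_neg h0]
        have e1 : (n - 1 - (rest - 1)).toNat = (n - rest).toNat := by omega
        have e2 : rest.toNat = (rest - 1).toNat + 1 := by omega
        rw [e1, e2, List.replicate_succ']
        simp

-- ===== VERDICT (by name: the statement is the Claim_ definition above) =====
theorem solution_spec : Claim_equal_solution := by
  intro n s _ hpre
  unfold Spec_solution solution_alt
  by_cases hlt : s < n
  · unfold solution; simp [hlt]
  · simp only [if_neg hlt]
    rcases lt_trichotomy n 0 with hneg | hz | hpos
    · -- n < 0: both sides empty
      have hb := PySem.Int.mod_neg_bounds (a := s) (b := n) hneg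
      have hstop : solAltLoop n s [] = [] := by
        unfold solAltLoop
        have : ¬ 0 < n := by omega
        simp [this]
      unfold solution
      simp only [if_neg hlt]
      have h1 : PySem.List.pyRange 0 n 1 = [] := PySem.List.pyRange_one_eq_nil (by omega)
      have h2 : PySem.List.pyRange 0 (PySem.Int.mod s n) 1 = [] :=
        PySem.List.pyRange_one_eq_nil (by omega)
      simp [h1, h2, hstop, PySem.List.sorted]
    · exact absurd ⟨hz, by omega⟩ hpre
    · rw [solution_eq_canon n s hpos hlt, solAltLoop_canon n.toNat n s hpos rfl]
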